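-- pv_equiv track=rewrite | github.com/ryanod2014/enigma | scripts/analyze_country_keys.py | second_vowel
-- ===== SOURCE A (Python) =====
-- VOWELS = "AEIOUY"
--
-- def second_vowel(word: str) -> int:
--     cnt=0
--     for i,ch in enumerate(word.upper(),1):
--         if ch in VOWELS:
--             cnt+=1
--             if cnt==2:
--                 return i
--     return 0
-- ===== SOURCE B (Python) =====
-- VOWELS = "AEIOUY"
--
-- def _find_vowel(u, start):
--     for j in range(start, len(u)):
--         if u[j] in VOWELS:
--             return j
--     return -1
--
-- def second_vowel(word: str) -> int:
--     u = word.upper()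
--     first = _find_vowel(u, 0)
--     if first < 0:
--         return 0
--     second = _find_vowel(u, first + 1)
--     return second + 1 if second >= 0 else 0
-- ===== Notes on version B (the rewrite author's own statement) =====
-- stated objective: alternative
-- what changed: Replaces the single counting-with-early-exit pass by two staged searches: find the index of the first vowel, then search again from just past it for the next vowel and convert that 0-based index to 1-based.
import Mathlib
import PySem

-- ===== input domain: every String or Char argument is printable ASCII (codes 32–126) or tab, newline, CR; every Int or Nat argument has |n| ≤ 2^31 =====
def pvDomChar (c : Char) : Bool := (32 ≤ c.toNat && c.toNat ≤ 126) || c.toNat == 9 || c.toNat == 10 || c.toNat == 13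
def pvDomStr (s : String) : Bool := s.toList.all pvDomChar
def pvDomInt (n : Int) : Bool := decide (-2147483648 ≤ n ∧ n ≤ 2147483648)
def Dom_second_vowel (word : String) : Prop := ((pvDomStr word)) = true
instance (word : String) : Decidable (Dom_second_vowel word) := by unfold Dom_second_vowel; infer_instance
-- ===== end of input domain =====

-- B replaces A's counting loop by two staged searches: find the first vowel, then the first vowel after it. Same value everywhere.
-- ===== PORT A =====
def pvVowels : List Char := "AEIOUY".toList

def svLoopA : List (Int × Char) → Nat → Int
  | [], _ => 0
  | (i, ch) :: rest, cnt =>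
    if ch ∈ pvVowels then
      if cnt + 1 = 2 then i else svLoopA rest (cnt + 1)
    else svLoopA rest cnt

def second_vowel (word : String) : Int :=
  svLoopA (PySem.List.enumerate (PySem.Chars.upper word.toList) 1) 0

-- ===== PORT B =====
-- port of _find_vowel: scan indices j = start, start+1, … for the first vowel, -1 if none
def svFind (u : List Char) (j : Nat) : Int :=
  if h : j < u.length then
    if u[j] ∈ pvVowels then (j : Int) else svFind u (j + 1)
  else -1
termination_by u.length - j

def second_vowel_alt (word : String) : Int :=
  let u := PySem.Chars.upper word.toList
  let first := svFind u 0
  if first < 0 then 0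
  else
    let second := svFind u (first.toNat + 1)
    if second ≥ 0 then second + 1 else 0

-- ===== PRECONDITION & SPEC =====
def Spec_second_vowel (word : String) (out : Int) : Prop := out = second_vowel_alt word
instance (word : String) (out : Int) : Decidable (Spec_second_vowel word out) := by unfold Spec_second_vowel; infer_instance

-- ===== CLAIM (what is proved, stated in full; the proofs are below) =====
def Claim_equal_second_vowel : Prop := ∀ (word : String), Dom_second_vowel word → Spec_second_vowel word (second_vowel word)

-- ===== LEMMAS AND PROOFS =====

def pvP (c : Char) : Bool := decide (c ∈ pvVowels)

-- B's search finds the first vowel index ≥ j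
lemma svFind_eq (u : List Char) (j : Nat) :
    svFind u j = ((u.drop j).findIdx? pvP).elim (-1) (fun k => ((j + k : Nat) : Int)) := by
  fun_induction svFind u j with
  | case1 j h hv =>
    rw [List.drop_eq_getElem_cons h, List.findIdx?_cons]
    simp [pvP, hv]
  | case2 j h hv ih =>
    rw [List.drop_eq_getElem_cons h, List.findIdx?_cons]
    simp only [pvP, hv, decide_false, ih]
    cases hfi : (u.drop (j + 1)).findIdx? pvP with
    | none => simp
    | some k => simp; ring
  | case3 j h =>
    rw [List.drop_eq_nil_of_le (by omega)]
    simp [List.findIdx?_nil]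

-- A's loop with one vowel already counted returns the position of the next vowel (0 if none)
lemma svLoopA_one (u : List Char) (a : Int) :
    svLoopA (PySem.List.enumerate u a) 1 =
      (u.findIdx? pvP).elim 0 (fun k => a + k) := by
  induction u generalizing a with
  | nil => simp [PySem.List.enumerate_nil, svLoopA, List.findIdx?_nil]
  | cons c t ih =>
    rw [PySem.List.enumerate_cons, List.findIdx?_cons]
    by_cases hv : c ∈ pvVowels
    · simp [svLoopA, hv, pvP]
    · simp only [svLoopA, hv, if_false, ih, pvP, decide_false]
      cases hfi : t.findIdx? pvP with
      | none => simp
      | some k => simp; ring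

-- A's loop from scratch: first vowel at k, then next vowel m past it, answer a + k + m + 1
lemma svLoopA_zero (u : List Char) (a : Int) :
    svLoopA (PySem.List.enumerate u a) 0 =
      (u.findIdx? pvP).elim 0 (fun k =>
        ((u.drop (k + 1)).findIdx? pvP).elim 0 (fun m => a + k + m + 1)) := by
  induction u generalizing a with
  | nil => simp [PySem.List.enumerate_nil, svLoopA, List.findIdx?_nil]
  | cons c t ih =>
    rw [PySem.List.enumerate_cons, List.findIdx?_cons]
    by_cases hv : c ∈ pvVowels
    · simp only [svLoopA, hv, if_true, pvP, decide_true, Option.elim_some, show (0:Nat)+1 ≠ 2 by decide,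
        if_false, svLoopA_one t (a+1)]
      cases hfi : t.findIdx? pvP with
      | none => simp [hfi]
      | some m => simp [hfi]; ring
    · simp only [svLoopA, hv, if_false, ih, pvP, decide_false]
      cases hfi : t.findIdx? pvP with
      | none => simp
      | some k =>
        simp only [Option.map_some, Option.elim_some, List.drop_succ_cons]
        cases hfi2 : (t.drop (k + 1)).findIdx? pvP with
        | none => simp [hfi2]
        | some m => simp [hfi2]; ring

-- ===== VERDICT (by name: the statement is the Claim_ definition above) =====
theorem second_vowel_spec : Claim_equal_second_vowel := by
  intro word _
  unfold Spec_second_vowel second_vowel second_vowel_alt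
  simp only [svLoopA_zero, svFind_eq, List.drop_zero]
  cases hfi : (PySem.Chars.upper word.toList).findIdx? pvP with
  | none => simp
  | some k =>
    simp only [Option.elim_some, Nat.zero_add]
    rw [if_neg (by omega)]
    rw [Int.toNat_natCast k]
    cases hfi2 : ((PySem.Chars.upper word.toList).drop (k + 1)).findIdx? pvP with
    | none => simp
    | some m =>
      simp only [Option.elim_some]
      rw [if_pos (by omega)]
      push_cast; ring
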